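-- pv_equiv track=rewrite | github.com/lukaponikvar/programiranje-1 | izpiti/2023-08-23/naloga3.py | pomagaj_dedku
-- ===== SOURCE A (Python) =====
-- def pomagaj_dedku(polica:list, vnuki:int):
--     def napolni(velikost:int):
--         prelomi = []
--         k = 0
--         for i, lonec in enumerate(polica):
--             k += lonec
--             if k > velikost:
--                 prelomi.append(i-1)
--                 k = lonec
--         return prelomi
--     kandidat = max(polica)
--     while True:
--         seznamcek = napolni(kandidat)
--         if len(seznamcek) <= vnuki-1:
--             rezultat = []
--             prejsnji = 0
--             for indeks in seznamcek:
--                 rezultat.append(polica[prejsnji:indeks+1])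
--                 prejsnji = indeks+1
--             rezultat.append(polica[prejsnji:])
--             return (kandidat, rezultat)
--         else:
--             kandidat += 1
-- ===== SOURCE B (Python) =====
-- def pomagaj_dedku(polica: list, vnuki: int):
--     # Jump search: instead of growing the capacity by 1, go straight to the smallest
--     # running-group sum that overflowed: every capacity strictly below it
--     # behaves identically, so no candidate is skipped. One pass also builds
--     # the groups directly, so no second slicing pass is needed.
--     kandidat = max(polica)
--     while True:
--         skupine = []
--         trenutna = []
--         k = 0
--         naj = None
--         for lonec in polica:
--             k += lonec
--             if k > kandidat:
--                 if naj is None or k < naj: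
--                     naj = k
--                 skupine.append(trenutna)
--                 trenutna = [lonec]
--                 k = lonec
--             else:
--                 trenutna.append(lonec)
--         skupine.append(trenutna)
--         if len(skupine) <= vnuki:
--             return (kandidat, skupine)
--         kandidat = naj
-- ===== Notes on version B (the rewrite author's own statement) =====
-- stated objective: alternative
-- what changed: Instead of incrementing the candidate capacity by 1 and re-scanning (plus a second slicing pass over break indices), B jumps the capacity directly to the smallest overflowing running-group sum (every capacity strictly below it yields the identical greedy run, so no candidate is skipped) and builds the groups in the same single pass; binary search was rejected because the group count is not monotone in the capacity when the shelf holds negative pots, while the jump search is exact there too.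
import Mathlib
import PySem

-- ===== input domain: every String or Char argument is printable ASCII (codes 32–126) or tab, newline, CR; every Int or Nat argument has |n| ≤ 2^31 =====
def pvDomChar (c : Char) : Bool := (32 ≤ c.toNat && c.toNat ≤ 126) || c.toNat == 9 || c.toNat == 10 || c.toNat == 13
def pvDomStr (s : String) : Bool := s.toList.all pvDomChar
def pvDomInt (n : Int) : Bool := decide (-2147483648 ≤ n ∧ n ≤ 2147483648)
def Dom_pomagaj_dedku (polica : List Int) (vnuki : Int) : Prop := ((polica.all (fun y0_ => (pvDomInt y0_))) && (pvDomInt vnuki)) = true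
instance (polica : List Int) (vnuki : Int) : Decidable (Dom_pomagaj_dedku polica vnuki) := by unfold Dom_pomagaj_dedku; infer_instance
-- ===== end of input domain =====

-- B replaces A's capacity+1 linear search (plus a second slicing pass) by a jump search:
-- the capacity jumps straight to the smallest overflowing running-group sum (no candidate
-- is skipped), and the groups are built in the same single pass.
-- Both loops may not terminate in Python (vnuki < 1); the ports carry a fuel bound
-- (pvFuel, a guard only) that is proved sufficient on Pre_.

-- fuel guard shared by both ports (not part of either algorithm; proved sufficient on Pre_)
def pvPosSum (xs : List Int) : Int := (xs.map (fun x => max x 0)).sum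

-- ===== PORT A =====
-- inner helper `napolni`: running sum k, break indices i-1 appended when k > velikost
def napolniA (polica : List Int) (velikost : Int) (i : Nat) (k : Int) : List Int :=
  match polica with
  | [] => []
  | lonec :: rest =>
      let k' := k + lonec
      if k' > velikost then ((i : Int) - 1) :: napolniA rest velikost (i+1) lonec
      else napolniA rest velikost (i+1) k'

-- the reconstruction loop: rezultat.append(polica[prejsnji:indeks+1]); prejsnji = indeks+1
def buildA (polica : List Int) (prejsnji : Int) (seznamcek : List Int) : List (List Int) :=
  match seznamcek with
  | [] => [PySem.List.slice polica (some prejsnji) none]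
  | indeks :: rest =>
      PySem.List.slice polica (some prejsnji) (some (indeks + 1)) :: buildA polica (indeks + 1) rest

-- while True: kandidat += 1   (fuel is a totality guard only)
def loopA (polica : List Int) (vnuki : Int) (fuel : Nat) (kandidat : Int) : Int × List (List Int) :=
  match fuel with
  | 0 => (kandidat, [])
  | fuel + 1 =>
      let seznamcek := napolniA polica kandidat 0 0
      if ((seznamcek.length : Int)) ≤ vnuki - 1 then
        (kandidat, buildA polica 0 seznamcek)
      else loopA polica vnuki fuel (kandidat + 1)

def pomagaj_dedku (polica : List Int) (vnuki : Int) : Int × List (List Int) :=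
  match PySem.List.max? polica (fun x => x) with
  | none => (0, [])   -- max([]) raises ValueError in Python; excluded by Pre_
  | some m => loopA polica vnuki ((pvPosSum polica - m).toNat + 1) m

-- ===== PORT B =====
-- single pass: builds the groups, tracks the smallest overflowing sum `naj`
def passB (polica : List Int) (kandidat : Int) (k : Int) (trenutna : List Int)
    (naj : Option Int) : List (List Int) × Option Int :=
  match polica with
  | [] => ([trenutna], naj)
  | lonec :: rest =>
      let k' := k + lonec
      if k' > kandidat then
        let naj' := match naj with
          | none => some k'
          | some n => if k' < n then some k' else some n
        let r := passB rest kandidat lonec [lonec] naj'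
        (trenutna :: r.1, r.2)
      else passB rest kandidat k' (trenutna ++ [lonec]) naj

-- while True: kandidat = naj   (fuel is a totality guard only; the getD default is
-- unreachable when the loop recurses: infeasible ⇒ at least one overflow ⇒ naj set)
def loopB (polica : List Int) (vnuki : Int) (fuel : Nat) (kandidat : Int) : Int × List (List Int) :=
  match fuel with
  | 0 => (kandidat, [])
  | fuel + 1 =>
      let r := passB polica kandidat 0 [] none
      if ((r.1.length : Int)) ≤ vnuki then (kandidat, r.1)
      else loopB polica vnuki fuel (r.2.getD (kandidat + 1))

def pomagaj_dedku_alt (polica : List Int) (vnuki : Int) : Int × List (List Int) :=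
  match PySem.List.max? polica (fun x => x) with
  | none => (0, [])
  | some m => loopB polica vnuki ((pvPosSum polica - m).toNat + 1) m

-- ===== PRECONDITION & SPEC =====
-- Pre_ excludes exactly the inputs where Python A does not return: the empty polica
-- (max([]) raises ValueError) and vnuki < 1 (the while-True loop never terminates,
-- since len(seznamcek) ≤ vnuki-1 < 0 is impossible).
def Pre_pomagaj_dedku (polica : List Int) (vnuki : Int) : Prop := polica ≠ [] ∧ 1 ≤ vnuki
instance (polica : List Int) (vnuki : Int) : Decidable (Pre_pomagaj_dedku polica vnuki) := by
  unfold Pre_pomagaj_dedku; infer_instance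

def pvWitness_pomagaj_dedku : List Int × Int := ([3, 1, 2], 2)

def Spec_pomagaj_dedku (polica : List Int) (vnuki : Int) (out : Int × List (List Int)) : Prop :=
  out = pomagaj_dedku_alt polica vnuki
instance (polica : List Int) (vnuki : Int) (out : Int × List (List Int)) :
    Decidable (Spec_pomagaj_dedku polica vnuki out) := by unfold Spec_pomagaj_dedku; infer_instance

-- ===== CLAIM (what is proved, stated in full; the proofs are below) =====
def Claim_equal_pomagaj_dedku : Prop := ∀ (polica : List Int) (vnuki : Int),
  Dom_pomagaj_dedku polica vnuki → Pre_pomagaj_dedku polica vnuki →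
  Spec_pomagaj_dedku polica vnuki (pomagaj_dedku polica vnuki)

-- ===== LEMMAS AND PROOFS =====

-- proof-side spec: number of breaks of the greedy run with capacity v, running sum k
def cnt (v k : Int) : List Int → Nat
  | [] => 0
  | x :: r => if k + x > v then cnt v x r + 1 else cnt v (k + x) r

-- proof-side spec: the greedy grouping
def gg (v k : Int) (cur : List Int) : List Int → List (List Int)
  | [] => [cur]
  | x :: r => if k + x > v then cur :: gg v x [x] r else gg v (k + x) (cur ++ [x]) r

-- proof-side spec: minimum overflowing sum
def mnaj (v k : Int) : List Int → Option Int
  | [] => none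
  | x :: r => if k + x > v then
      (match mnaj v x r with
       | none => some (k + x)
       | some n => some (min (k + x) n))
    else mnaj v (k + x) r

def ominOpt (a b : Option Int) : Option Int :=
  match a, b with
  | none, b => b
  | some n, none => some n
  | some n, some m => some (min n m)

theorem napolniA_length (v : Int) : ∀ (xs : List Int) (i : Nat) (k : Int),
    (napolniA xs v i k).length = cnt v k xs := by
  intro xs
  induction xs with
  | nil => intro i k; rfl
  | cons x r ih =>
      intro i k
      simp only [napolniA, cnt]
      split <;> simp [ih]

theorem gg_length (v : Int) : ∀ (xs : List Int) (k : Int) (cur : List Int),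
    (gg v k cur xs).length = cnt v k xs + 1 := by
  intro xs
  induction xs with
  | nil => intro k cur; rfl
  | cons x r ih =>
      intro k cur
      simp only [gg, cnt]
      split <;> simp [ih]

theorem passB_fst (v : Int) : ∀ (xs : List Int) (k : Int) (cur : List Int) (naj : Option Int),
    (passB xs v k cur naj).1 = gg v k cur xs := by
  intro xs
  induction xs with
  | nil => intro k cur naj; rfl
  | cons x r ih =>
      intro k cur naj
      simp only [passB, gg]
      split <;> simp [ih]

theorem passB_snd (v : Int) : ∀ (xs : List Int) (k : Int) (cur : List Int) (naj : Option Int),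
    (passB xs v k cur naj).2 = ominOpt naj (mnaj v k xs) := by
  intro xs
  induction xs with
  | nil => intro k cur naj; cases naj <;> rfl
  | cons x r ih =>
      intro k cur naj
      by_cases hb : k + x > v
      · simp only [passB, if_pos hb, mnaj, ih]
        rcases naj with _ | n <;> rcases h2 : mnaj v x r with _ | m <;>
          simp only [h2, ominOpt] <;> split_ifs <;>
          simp only [ominOpt, Option.some.injEq] <;> omega
      · simp only [passB, if_neg hb, mnaj, ih]

theorem mnaj_gt (v : Int) : ∀ (xs : List Int) (k n : Int), mnaj v k xs = some n → v < n := by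
  intro xs
  induction xs with
  | nil => intro k n h; simp [mnaj] at h
  | cons x r ih =>
      intro k n h
      simp only [mnaj] at h
      split at h
      · rcases h2 : mnaj v x r with _ | m <;> rw [h2] at h <;> simp at h
        · omega
        · rcases h with rfl
          have := ih x m h2
          omega
      · exact ih _ _ h

theorem mnaj_none_cnt (v : Int) : ∀ (xs : List Int) (k : Int),
    mnaj v k xs = none → cnt v k xs = 0 := by
  intro xs
  induction xs with
  | nil => intro k _; rfl
  | cons x r ih =>
      intro k h
      simp only [mnaj] at h
      simp only [cnt]
      split at h
      · rcases h2 : mnaj v x r with _ | m <;> rw [h2] at h <;> simp at h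
      · rw [if_neg (by assumption)]
        exact ih _ h

-- every capacity u with v ≤ u strictly below every overflow sum of the v-run
-- produces the identical greedy run
theorem run_const (v u : Int) (hvu : v ≤ u) : ∀ (xs : List Int) (k : Int),
    (∀ n, mnaj v k xs = some n → u < n) →
    cnt u k xs = cnt v k xs ∧ (∀ cur, gg u k cur xs = gg v k cur xs) := by
  intro xs
  induction xs with
  | nil => intro k _; exact ⟨rfl, fun _ => rfl⟩
  | cons x r ih =>
      intro k hmin
      by_cases hb : k + x > v
      · have hsome : ∀ n, mnaj v x r = some n → u < n := by
          intro n hn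
          have := hmin (min (k + x) n) (by simp [mnaj, hb, hn])
          omega
        have hu : k + x > u := by
          rcases h2 : mnaj v x r with _ | m
          · have := hmin (k + x) (by simp [mnaj, hb, h2])
            omega
          · have := hmin (min (k + x) m) (by simp [mnaj, hb, h2])
            omega
        have := ih x hsome
        constructor
        · simp only [cnt, if_pos hb, if_pos hu, this.1]
        · intro cur; simp only [gg, if_pos hb, if_pos hu, this.2]
      · have hu : ¬ (k + x > u) := by omega
        have hrest : ∀ n, mnaj v (k + x) r = some n → u < n := by
          intro n hn
          exact hmin n (by simp [mnaj, hb, hn])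
        have := ih (k + x) hrest
        constructor
        · simp only [cnt, if_neg hb, if_neg hu, this.1]
        · intro cur; simp only [gg, if_neg hb, if_neg hu, this.2]

theorem pvPosSum_nonneg : ∀ (xs : List Int), 0 ≤ pvPosSum xs := by
  intro xs
  induction xs with
  | nil => simp [pvPosSum]
  | cons x r ih =>
      simp only [pvPosSum, List.map_cons, List.sum_cons]
      have : 0 ≤ max x 0 := le_max_right x 0
      simp only [pvPosSum] at ih
      omega

theorem cnt_feasible (v : Int) : ∀ (xs : List Int) (k : Int),
    k + pvPosSum xs ≤ v → cnt v k xs = 0 := by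
  intro xs
  induction xs with
  | nil => intro k _; rfl
  | cons x r ih =>
      intro k h
      simp only [pvPosSum, List.map_cons, List.sum_cons] at h
      have hp := pvPosSum_nonneg r
      simp only [pvPosSum] at hp ih
      have hx : x ≤ max x 0 := le_max_left x 0
      have hnb : ¬ (k + x > v) := by omega
      simp only [cnt, if_neg hnb]
      exact ih (k + x) (by omega)

-- buildA over napolniA's break indices is the direct greedy grouping
theorem buildA_gg (xs : List Int) (v : Int) : ∀ (rest : List Int) (i p : Nat) (k : Int),
    p ≤ i → rest = xs.drop i →
    buildA xs (p : Int) (napolniA rest v i k) = gg v k ((xs.drop p).take (i - p)) rest := by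
  intro rest
  induction rest with
  | nil =>
      intro i p k hpi hdrop
      have hlen : xs.length ≤ i := by
        by_contra h
        have hne : xs.drop i ≠ [] := by
          apply List.ne_nil_of_length_pos
          rw [List.length_drop]; omega
        exact hne hdrop.symm
      simp only [napolniA, buildA, gg]
      rw [PySem.List.slice_from_natCast]
      congr 1
      rw [List.take_of_length_le]
      rw [List.length_drop]; omega
  | cons x r ih =>
      intro i p k hpi hdrop
      have hi : i < xs.length := by
        by_contra h
        rw [List.drop_of_length_le (by omega)] at hdrop
        exact (List.cons_ne_nil x r) hdrop
      have h0 : (xs.drop i)[0]? = some x := by rw [← hdrop]; rfl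
      have hx : xs[i]? = some x := by
        rw [List.getElem?_drop] at h0
        simpa using h0
      have hr : r = xs.drop (i + 1) := by
        have ht : (xs.drop i).tail = xs.drop (i + 1) := List.tail_drop ..
        rw [← hdrop] at ht
        simpa using ht
      by_cases hb : k + x > v
      · simp only [napolniA, if_pos hb, buildA, gg, if_pos hb]
        have hend : ((i : Int) - 1 + 1) = ((i : Nat) : Int) := by omega
        rw [hend, PySem.List.slice_natCast]
        congr 1
        have := ih (i + 1) i x (by omega) hr
        rw [this]
        congr 1
        rw [Nat.add_sub_cancel_left]
        rw [← hdrop]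
        simp
      · simp only [napolniA, if_neg hb, gg, if_neg hb]
        have := ih (i + 1) p (k + x) (by omega) hr
        rw [this]
        congr 1
        have h1 : i + 1 - p = (i - p) + 1 := by omega
        rw [h1, List.take_succ]
        congr 1
        have hg : (xs.drop p)[i - p]? = some x := by
          rw [List.getElem?_drop]
          have he : p + (i - p) = i := by omega
          rw [he, hx]
        rw [hg]
        rfl

-- A's +1 loop reaches the least feasible capacity
theorem loopA_eq (xs : List Int) (vnuki : Int) : ∀ (fuel : Nat) (v : Int)
    (h : ∃ n : Nat, ((cnt (v + n) 0 xs : Int)) ≤ vnuki - 1),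
    Nat.find h < fuel →
    loopA xs vnuki fuel v =
      (v + (Nat.find h : Int), buildA xs 0 (napolniA xs (v + (Nat.find h : Int)) 0 0)) := by
  intro fuel
  induction fuel with
  | zero => intro v h hf; omega
  | succ fuel ih =>
      intro v h hf
      by_cases hfeas : ((cnt v 0 xs : Int)) ≤ vnuki - 1
      · have h0 : Nat.find h = 0 := by
          rw [Nat.find_eq_zero]
          show ((cnt (v + ((0 : Nat) : Int)) 0 xs : Int)) ≤ vnuki - 1
          simpa using hfeas
        simp only [loopA, napolniA_length]
        rw [if_pos hfeas, h0]
        simp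
      · have hpos : 0 < Nat.find h := by
          rcases Nat.eq_zero_or_pos (Nat.find h) with h0 | h0
          · exfalso
            apply hfeas
            have := Nat.find_spec h
            rw [h0] at this
            simpa using this
          · exact h0
        have h' : ∃ n : Nat, ((cnt ((v + 1) + n) 0 xs : Int)) ≤ vnuki - 1 := by
          refine ⟨Nat.find h - 1, ?_⟩
          have harg : (v + 1) + ((Nat.find h - 1 : Nat) : Int) = v + (Nat.find h : Int) := by
            omega
          rw [harg]
          exact Nat.find_spec h
        have hfind : Nat.find h' = Nat.find h - 1 := by
          apply (Nat.find_eq_iff h').mpr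
          constructor
          · have harg : (v + 1) + ((Nat.find h - 1 : Nat) : Int) = v + (Nat.find h : Int) := by
              omega
            rw [harg]
            exact Nat.find_spec h
          · intro m hm hcon
            apply Nat.find_min h (m := m + 1) (by omega)
            have harg : v + ((m + 1 : Nat) : Int) = (v + 1) + (m : Int) := by push_cast; ring
            rw [harg]
            exact hcon
        simp only [loopA, napolniA_length]
        rw [if_neg hfeas]
        rw [ih (v + 1) h' (by omega), hfind]
        have he : (v + 1) + ((Nat.find h - 1 : Nat) : Int) = v + (Nat.find h : Int) := by omega
        rw [he]

-- B's jump loop reaches the same least feasible capacity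
theorem loopB_eq (xs : List Int) (vnuki : Int) (hv : 1 ≤ vnuki) : ∀ (fuel : Nat) (v : Int)
    (h : ∃ n : Nat, ((cnt (v + n) 0 xs : Int)) ≤ vnuki - 1),
    Nat.find h < fuel →
    loopB xs vnuki fuel v =
      (v + (Nat.find h : Int), gg (v + (Nat.find h : Int)) 0 [] xs) := by
  intro fuel
  induction fuel with
  | zero => intro v h hf; omega
  | succ fuel ih =>
      intro v h hf
      by_cases hfeas : ((cnt v 0 xs : Int)) ≤ vnuki - 1
      · have h0 : Nat.find h = 0 := by
          rw [Nat.find_eq_zero]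
          show ((cnt (v + ((0 : Nat) : Int)) 0 xs : Int)) ≤ vnuki - 1
          simpa using hfeas
        have hcond : (((passB xs v 0 [] none).1.length : Int)) ≤ vnuki := by
          rw [passB_fst, gg_length]
          push_cast
          omega
        simp only [loopB]
        rw [if_pos hcond, h0, passB_fst]
        simp
      · have hcnt : cnt v 0 xs ≠ 0 := by
          intro h0
          exact hfeas (by rw [h0]; push_cast; omega)
        have hsome : ∃ n, mnaj v 0 xs = some n := by
          rcases h2 : mnaj v 0 xs with _ | n
          · exact absurd (mnaj_none_cnt v xs 0 h2) hcnt
          · exact ⟨n, rfl⟩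
        rcases hsome with ⟨n, hn⟩
        have hvn : v < n := mnaj_gt v xs 0 n hn
        have hcond : ¬ ((((passB xs v 0 [] none).1.length : Int)) ≤ vnuki) := by
          rw [passB_fst, gg_length]
          push_cast
          omega
        simp only [loopB]
        rw [if_neg hcond, passB_snd, hn]
        simp only [ominOpt, Option.getD_some]
        have hinfeas : ∀ m : Nat, (m : Int) < n - v → ¬ ((cnt (v + m) 0 xs : Int) ≤ vnuki - 1) := by
          intro m hm
          have hconst := run_const v (v + m) (by omega) xs 0
            (by intro n' hn'; rw [hn] at hn'; injection hn' with e; omega)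
          rw [hconst.1]
          exact hfeas
        have hNge : (n - v).toNat ≤ Nat.find h := by
          by_contra hlt
          push_neg at hlt
          exact hinfeas (Nat.find h) (by omega) (Nat.find_spec h)
        have h' : ∃ m : Nat, ((cnt (n + m) 0 xs : Int)) ≤ vnuki - 1 := by
          refine ⟨Nat.find h - (n - v).toNat, ?_⟩
          have harg : n + ((Nat.find h - (n - v).toNat : Nat) : Int) = v + (Nat.find h : Int) := by
            omega
          rw [harg]
          exact Nat.find_spec h
        have hfind : Nat.find h' = Nat.find h - (n - v).toNat := by
          apply (Nat.find_eq_iff h').mpr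
          constructor
          · have harg : n + ((Nat.find h - (n - v).toNat : Nat) : Int) = v + (Nat.find h : Int) := by
              omega
            rw [harg]
            exact Nat.find_spec h
          · intro m hm hcon
            apply Nat.find_min h (m := m + (n - v).toNat) (by omega)
            have harg : v + ((m + (n - v).toNat : Nat) : Int) = n + (m : Int) := by
              push_cast; omega
            rw [harg]
            exact hcon
        rw [ih n h' (by omega), hfind]
        have he : n + ((Nat.find h - (n - v).toNat : Nat) : Int) = v + (Nat.find h : Int) := by
          omega
        rw [he]

-- ===== VERDICT (by name: the statement is the Claim_ definition above) =====
theorem pomagaj_dedku_spec : Claim_equal_pomagaj_dedku := by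
  unfold Claim_equal_pomagaj_dedku
  intro polica vnuki _ hpre
  rcases hpre with ⟨hne, hv⟩
  unfold Spec_pomagaj_dedku pomagaj_dedku pomagaj_dedku_alt
  rcases hM : PySem.List.max? polica (fun x => x) with _ | m
  · rfl
  · have hW : cnt (m + ((pvPosSum polica - m).toNat : Int)) 0 polica = 0 := by
      apply cnt_feasible
      have hps := pvPosSum_nonneg polica
      omega
    have hfeas : ∃ n : Nat, ((cnt (m + n) 0 polica : Int)) ≤ vnuki - 1 := by
      refine ⟨(pvPosSum polica - m).toNat, ?_⟩
      rw [hW]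
      push_cast
      omega
    have hfuel : Nat.find hfeas < (pvPosSum polica - m).toNat + 1 := by
      have := Nat.find_min' hfeas (m := (pvPosSum polica - m).toNat) (by
        rw [hW]; push_cast; omega)
      omega
    show loopA polica vnuki ((pvPosSum polica - m).toNat + 1) m =
      loopB polica vnuki ((pvPosSum polica - m).toNat + 1) m
    rw [loopA_eq polica vnuki _ m hfeas hfuel, loopB_eq polica vnuki hv _ m hfeas hfuel]
    rw [Prod.mk.injEq]
    refine ⟨rfl, ?_⟩
    have hb := buildA_gg polica (m + ((Nat.find hfeas : Nat) : Int)) polica 0 0 0 (le_refl 0)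
      (by simp)
    simpa using hb
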